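-- pv_equiv track=rewrite | github.com/froggeric/lavolcanica.com | enhance_descriptions_with_google_maps.py | extract_useful_information
-- ===== SOURCE A (Python) =====
-- from typing import Dict, List, Optional
--
-- def extract_useful_information(description: str) -> Dict[str, str]:
--     """Extract useful surf information from descriptions"""
--     if not description or description.strip() == 'Surf Spot':
--         return {}
--
--     useful_info = {}
--     desc = description.lower()
--
--     # Wave type and characteristics
--     if 'reef break' in desc or 'reef' in desc:
--         useful_info['wave_type'] = 'reef break'
--     elif 'beach break' in desc or 'beach' in desc:
--         useful_info['wave_type'] = 'beach break'
--     elif 'point break' in desc or 'point' in desc: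
--         useful_info['wave_type'] = 'point break'
--
--     # Ability level
--     if 'beginner' in desc:
--         useful_info['ability_level'] = 'suitable for beginners'
--     elif 'intermediate' in desc:
--         useful_info['ability_level'] = 'suitable for intermediate surfers'
--     elif 'advanced' in desc or 'expert' in desc:
--         useful_info['ability_level'] = 'suitable for advanced/expert surfers'
--
--     # Bottom composition
--     if 'sand' in desc:
--         useful_info['bottom'] = 'sand bottom'
--     elif 'rock' in desc or 'rocks' in desc:
--         useful_info['bottom'] = 'rocky bottom'
--     elif 'lava' in desc:
--         useful_info['bottom'] = 'volcanic lava bottom'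
--
--     # Key features
--     if 'barrel' in desc or 'tub' in desc:
--         useful_info['features'] = 'offers barreling sections'
--     if 'hollow' in desc:
--         useful_info['wave_shape'] = 'hollow waves'
--     if 'powerful' in desc:
--         useful_info['wave_power'] = 'powerful waves'
--     if 'fast' in desc:
--         useful_info['wave_speed'] = 'fast waves'
--
--     # Conditions
--     if any(word in desc for word in ['works well', 'best', 'ideal']):
--         useful_info['has_best_conditions'] = 'best conditions described'
--
--     return useful_info
-- ===== SOURCE B (Python) =====
-- # B: different algorithm — one left-to-right sweep over the lowered description
-- # collects the set of matched keywords (checking every pattern at each position),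
-- # then a pure decision stage reads only that hit set; no per-attribute string scans.
-- # Keywords subsumed by a shorter one ('reef break', 'beach break', 'point break',
-- # 'rocks') are dropped since the shorter substring matching implies them.
--
-- KEYWORDS = ["reef", "beach", "point", "beginner", "intermediate", "advanced",
--             "expert", "sand", "rock", "lava", "barrel", "tub", "hollow",
--             "powerful", "fast", "works well", "best", "ideal"]
--
--
-- def extract_useful_information(description: str):
--     if not description or description.strip() == 'Surf Spot':
--         return {}
--     desc = description.lower()
--
--     # Pass 1: single sweep, multi-pattern match at each position.
--     hit = set()
--     for i in range(len(desc)):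
--         for kw in KEYWORDS:
--             if desc.startswith(kw, i):
--                 hit.add(kw)
--
--     # Pass 2: decide attributes purely from the hit set.
--     info = {}
--     if 'reef' in hit:
--         info['wave_type'] = 'reef break'
--     elif 'beach' in hit:
--         info['wave_type'] = 'beach break'
--     elif 'point' in hit:
--         info['wave_type'] = 'point break'
--     if 'beginner' in hit:
--         info['ability_level'] = 'suitable for beginners'
--     elif 'intermediate' in hit:
--         info['ability_level'] = 'suitable for intermediate surfers'
--     elif 'advanced' in hit or 'expert' in hit:
--         info['ability_level'] = 'suitable for advanced/expert surfers'
--     if 'sand' in hit: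
--         info['bottom'] = 'sand bottom'
--     elif 'rock' in hit:
--         info['bottom'] = 'rocky bottom'
--     elif 'lava' in hit:
--         info['bottom'] = 'volcanic lava bottom'
--     if 'barrel' in hit or 'tub' in hit:
--         info['features'] = 'offers barreling sections'
--     if 'hollow' in hit:
--         info['wave_shape'] = 'hollow waves'
--     if 'powerful' in hit:
--         info['wave_power'] = 'powerful waves'
--     if 'fast' in hit:
--         info['wave_speed'] = 'fast waves'
--     if 'works well' in hit or 'best' in hit or 'ideal' in hit:
--         info['has_best_conditions'] = 'best conditions described'
--     return info
-- ===== Notes on version B (the rewrite author's own statement) =====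
-- stated objective: alternative
-- what changed: Replaced A's per-attribute substring searches (one full scan of the description per keyword test) by a single left-to-right sweep that multi-pattern-matches all keywords at each position into a hit set, followed by a pure decision stage that reads only that set; keywords subsumed by a shorter substring ('reef break', 'beach break', 'point break', 'rocks') are dropped.
import Mathlib
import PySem

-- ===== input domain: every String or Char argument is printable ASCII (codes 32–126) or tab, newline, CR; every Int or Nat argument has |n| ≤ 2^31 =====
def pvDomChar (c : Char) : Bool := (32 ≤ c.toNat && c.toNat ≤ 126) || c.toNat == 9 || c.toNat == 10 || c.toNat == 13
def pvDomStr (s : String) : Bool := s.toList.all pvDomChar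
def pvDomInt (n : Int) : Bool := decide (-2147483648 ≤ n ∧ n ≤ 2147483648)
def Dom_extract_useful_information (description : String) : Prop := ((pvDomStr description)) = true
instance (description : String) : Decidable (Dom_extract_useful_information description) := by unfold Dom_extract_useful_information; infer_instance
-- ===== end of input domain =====

-- B replaces A's per-attribute substring searches by a single sweep that collects the set of
-- matched keywords, then decides all attributes from that set (objective: alternative algorithm).

-- ===== PORT A =====
def extract_useful_information (description : String) : List (String × String) :=
  if description == "" || PySem.Str.strip description == "Surf Spot" then
    (PySem.Dict.empty : PySem.Dict String String).items
  else
    let useful_info : PySem.Dict String String := PySem.Dict.empty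
    let desc := PySem.Str.lower description
    let useful_info :=
      if PySem.Str.isIn "reef break" desc || PySem.Str.isIn "reef" desc then
        useful_info.insert "wave_type" "reef break"
      else if PySem.Str.isIn "beach break" desc || PySem.Str.isIn "beach" desc then
        useful_info.insert "wave_type" "beach break"
      else if PySem.Str.isIn "point break" desc || PySem.Str.isIn "point" desc then
        useful_info.insert "wave_type" "point break"
      else useful_info
    let useful_info :=
      if PySem.Str.isIn "beginner" desc then
        useful_info.insert "ability_level" "suitable for beginners"
      else if PySem.Str.isIn "intermediate" desc then
        useful_info.insert "ability_level" "suitable for intermediate surfers"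
      else if PySem.Str.isIn "advanced" desc || PySem.Str.isIn "expert" desc then
        useful_info.insert "ability_level" "suitable for advanced/expert surfers"
      else useful_info
    let useful_info :=
      if PySem.Str.isIn "sand" desc then
        useful_info.insert "bottom" "sand bottom"
      else if PySem.Str.isIn "rock" desc || PySem.Str.isIn "rocks" desc then
        useful_info.insert "bottom" "rocky bottom"
      else if PySem.Str.isIn "lava" desc then
        useful_info.insert "bottom" "volcanic lava bottom"
      else useful_info
    let useful_info :=
      if PySem.Str.isIn "barrel" desc || PySem.Str.isIn "tub" desc then
        useful_info.insert "features" "offers barreling sections"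
      else useful_info
    let useful_info :=
      if PySem.Str.isIn "hollow" desc then
        useful_info.insert "wave_shape" "hollow waves"
      else useful_info
    let useful_info :=
      if PySem.Str.isIn "powerful" desc then
        useful_info.insert "wave_power" "powerful waves"
      else useful_info
    let useful_info :=
      if PySem.Str.isIn "fast" desc then
        useful_info.insert "wave_speed" "fast waves"
      else useful_info
    let useful_info :=
      if ["works well", "best", "ideal"].any (fun w => PySem.Str.isIn w desc) then
        useful_info.insert "has_best_conditions" "best conditions described"
      else useful_info
    useful_info.items

-- ===== PORT B =====
-- one sweep over the string collects which keywords occur; the decision stage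
-- reads only the hit set
def pvKeywords : List String :=
  ["reef", "beach", "point", "beginner", "intermediate", "advanced",
   "expert", "sand", "rock", "lava", "barrel", "tub", "hollow",
   "powerful", "fast", "works well", "best", "ideal"]

-- Python's desc.startswith(kw, i) is exactly 'kw.toList is a prefix of desc.toList.drop i'
def pvScanHits (chars : List Char) : PySem.Set String :=
  (List.range chars.length).foldl
    (fun hit i =>
      pvKeywords.foldl
        (fun hit kw => if kw.toList.isPrefixOf (chars.drop i) then hit.add kw else hit)
        hit)
    PySem.Set.empty

def extract_useful_information_alt (description : String) : List (String × String) :=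
  if description == "" || PySem.Str.strip description == "Surf Spot" then
    (PySem.Dict.empty : PySem.Dict String String).items
  else
    let desc := PySem.Str.lower description
    let hit := pvScanHits desc.toList
    let info : PySem.Dict String String := PySem.Dict.empty
    let info :=
      if PySem.Set.contains hit "reef" then info.insert "wave_type" "reef break"
      else if PySem.Set.contains hit "beach" then info.insert "wave_type" "beach break"
      else if PySem.Set.contains hit "point" then info.insert "wave_type" "point break"
      else info
    let info :=
      if PySem.Set.contains hit "beginner" then info.insert "ability_level" "suitable for beginners"
      else if PySem.Set.contains hit "intermediate" then info.insert "ability_level" "suitable for intermediate surfers"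
      else if PySem.Set.contains hit "advanced" || PySem.Set.contains hit "expert" then
        info.insert "ability_level" "suitable for advanced/expert surfers"
      else info
    let info :=
      if PySem.Set.contains hit "sand" then info.insert "bottom" "sand bottom"
      else if PySem.Set.contains hit "rock" then info.insert "bottom" "rocky bottom"
      else if PySem.Set.contains hit "lava" then info.insert "bottom" "volcanic lava bottom"
      else info
    let info :=
      if PySem.Set.contains hit "barrel" || PySem.Set.contains hit "tub" then
        info.insert "features" "offers barreling sections"
      else info
    let info :=
      if PySem.Set.contains hit "hollow" then info.insert "wave_shape" "hollow waves" else info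
    let info :=
      if PySem.Set.contains hit "powerful" then info.insert "wave_power" "powerful waves" else info
    let info :=
      if PySem.Set.contains hit "fast" then info.insert "wave_speed" "fast waves" else info
    let info :=
      if PySem.Set.contains hit "works well" || PySem.Set.contains hit "best" || PySem.Set.contains hit "ideal" then
        info.insert "has_best_conditions" "best conditions described"
      else info
    info.items

-- ===== PRECONDITION & SPEC =====
def Spec_extract_useful_information (description : String) (out : List (String × String)) : Prop := out = extract_useful_information_alt description
instance (description : String) (out : List (String × String)) : Decidable (Spec_extract_useful_information description out) := by unfold Spec_extract_useful_information; infer_instance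

-- ===== CLAIM (what is proved, stated in full; the proofs are below) =====
def Claim_equal_extract_useful_information : Prop := ∀ (description : String), Dom_extract_useful_information description → Spec_extract_useful_information description (extract_useful_information description)

-- ===== LEMMAS AND PROOFS =====

-- membership in the inner fold of the sweep
theorem pv_mem_inner (chars : List Char) (i : Nat) (kws : List String)
    (s : PySem.Set String) (a : String) :
    a ∈ kws.foldl
        (fun hit kw => if kw.toList.isPrefixOf (chars.drop i) then hit.add kw else hit) s ↔
      a ∈ s ∨ (a ∈ kws ∧ a.toList <+: chars.drop i) := by
  induction kws generalizing s with
  | nil => simp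
  | cons k rest ih =>
    by_cases h : k.toList.isPrefixOf (chars.drop i) = true
    · simp only [List.foldl_cons, if_pos h, ih, PySem.Set.mem_add, List.mem_cons]
      rw [List.isPrefixOf_iff_prefix] at h
      constructor
      · rintro ((hs | rfl) | ⟨hm, hp⟩)
        · exact Or.inl hs
        · exact Or.inr ⟨Or.inl rfl, h⟩
        · exact Or.inr ⟨Or.inr hm, hp⟩
      · rintro (hs | ⟨(rfl | hm), hp⟩)
        · exact Or.inl (Or.inl hs)
        · exact Or.inl (Or.inr rfl)
        · exact Or.inr ⟨hm, hp⟩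
    · simp only [List.foldl_cons, if_neg h, ih, List.mem_cons]
      rw [List.isPrefixOf_iff_prefix] at h
      constructor
      · rintro (hs | ⟨hm, hp⟩)
        · exact Or.inl hs
        · exact Or.inr ⟨Or.inr hm, hp⟩
      · rintro (hs | ⟨(rfl | hm), hp⟩)
        · exact Or.inl hs
        · exact absurd hp h
        · exact Or.inr ⟨hm, hp⟩

-- membership in the whole sweep
theorem pv_mem_scan (chars : List Char) (a : String) :
    a ∈ pvScanHits chars ↔ a ∈ pvKeywords ∧ ∃ i, a.toList <+: chars.drop i := by
  unfold pvScanHits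
  have main : ∀ (is : List Nat) (s : PySem.Set String),
      a ∈ is.foldl
          (fun hit i => pvKeywords.foldl
            (fun hit kw => if kw.toList.isPrefixOf (chars.drop i) then hit.add kw else hit) hit) s ↔
        a ∈ s ∨ (a ∈ pvKeywords ∧ ∃ i ∈ is, a.toList <+: chars.drop i) := by
    intro is
    induction is with
    | nil => simp
    | cons j rest ih =>
      intro s
      simp only [List.foldl_cons, ih, pv_mem_inner, List.mem_cons]
      constructor
      · rintro ((hs | ⟨hm, hp⟩) | ⟨hm, i, hi, hp⟩)
        · exact Or.inl hs
        · exact Or.inr ⟨hm, j, Or.inl rfl, hp⟩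
        · exact Or.inr ⟨hm, i, Or.inr hi, hp⟩
      · rintro (hs | ⟨hm, i, (rfl | hi), hp⟩)
        · exact Or.inl (Or.inl hs)
        · exact Or.inl (Or.inr ⟨hm, hp⟩)
        · exact Or.inr ⟨hm, i, hi, hp⟩
  rw [main]
  simp only [PySem.Set.empty]
  constructor
  · rintro (h | ⟨hm, i, _, hp⟩)
    · simp at h
    · exact ⟨hm, i, hp⟩
  · rintro ⟨hm, i, hp⟩
    by_cases hlt : i < chars.length
    · exact Or.inr ⟨hm, i, by simpa using hlt, hp⟩
    · -- i ≥ length: drop i = [], so a = "" — impossible for our keywords, but handle: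
      rw [List.drop_eq_nil_of_le (by omega)] at hp
      have ha : a.toList = [] := List.prefix_nil.mp hp
      -- then a is a prefix of drop 0 too when chars nonempty, else a ∈ pvKeywords is false
      fin_cases hm <;> simp_all

-- for each keyword in the list, the sweep's hit test equals Python's 'kw in desc'
theorem pv_contains_scan (desc : String) (kw : String) (hm : kw ∈ pvKeywords) :
    PySem.Set.contains (pvScanHits desc.toList) kw = PySem.Str.isIn kw desc := by
  rw [PySem.Str.isIn_eq]
  cases h : PySem.Chars.isIn kw.toList desc.toList with
  | true =>
    have hdrop := (PySem.Chars.exists_prefix_drop_iff_isIn kw.toList desc.toList).mpr h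
    obtain ⟨j, hp⟩ := hdrop
    exact (PySem.Set.contains_iff _ _).mpr ((pv_mem_scan desc.toList kw).mpr ⟨hm, j, hp⟩)
  | false =>
    cases hc : PySem.Set.contains (pvScanHits desc.toList) kw with
    | false => rfl
    | true =>
      exfalso
      obtain ⟨_, i, hp⟩ := (pv_mem_scan desc.toList kw).mp ((PySem.Set.contains_iff _ _).mp hc)
      rw [(PySem.Chars.exists_prefix_drop_iff_isIn kw.toList desc.toList).mp ⟨i, hp⟩] at h
      exact Bool.noConfusion h

-- substring monotonicity: if a longer keyword occurs, so does a keyword infix in it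
theorem pv_isIn_mono (a b s : String) (h : a.toList <:+: b.toList)
    (hb : PySem.Str.isIn b s = true) : PySem.Str.isIn a s = true := by
  rw [PySem.Str.isIn_iff_infix] at hb ⊢
  exact h.trans hb

-- 'b in s or a in s' collapses to 'a in s' when a is an infix of b ('reef break' vs 'reef')
theorem pv_or_collapse_left (a b s : String) (h : a.toList <:+: b.toList) :
    (PySem.Str.isIn b s || PySem.Str.isIn a s) = PySem.Str.isIn a s := by
  cases hb : PySem.Str.isIn b s
  · rw [Bool.false_or]
  · rw [Bool.true_or, pv_isIn_mono a b s h hb]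

-- 'a in s or b in s' collapses to 'a in s' when a is an infix of b ('rock' vs 'rocks')
theorem pv_or_collapse_right (a b s : String) (h : a.toList <:+: b.toList) :
    (PySem.Str.isIn a s || PySem.Str.isIn b s) = PySem.Str.isIn a s := by
  cases hb : PySem.Str.isIn b s
  · rw [Bool.or_false]
  · rw [Bool.or_true, pv_isIn_mono a b s h hb]

-- ===== VERDICT (by name: the statement is the Claim_ definition above) =====
theorem extract_useful_information_spec : Claim_equal_extract_useful_information := by
  intro description _
  unfold Spec_extract_useful_information
  unfold extract_useful_information extract_useful_information_alt
  simp only [List.any,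
    pv_contains_scan _ _ (show "reef" ∈ pvKeywords by decide),
    pv_contains_scan _ _ (show "beach" ∈ pvKeywords by decide),
    pv_contains_scan _ _ (show "point" ∈ pvKeywords by decide),
    pv_contains_scan _ _ (show "beginner" ∈ pvKeywords by decide),
    pv_contains_scan _ _ (show "intermediate" ∈ pvKeywords by decide),
    pv_contains_scan _ _ (show "advanced" ∈ pvKeywords by decide),
    pv_contains_scan _ _ (show "expert" ∈ pvKeywords by decide),
    pv_contains_scan _ _ (show "sand" ∈ pvKeywords by decide),
    pv_contains_scan _ _ (show "rock" ∈ pvKeywords by decide),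
    pv_contains_scan _ _ (show "lava" ∈ pvKeywords by decide),
    pv_contains_scan _ _ (show "barrel" ∈ pvKeywords by decide),
    pv_contains_scan _ _ (show "tub" ∈ pvKeywords by decide),
    pv_contains_scan _ _ (show "hollow" ∈ pvKeywords by decide),
    pv_contains_scan _ _ (show "powerful" ∈ pvKeywords by decide),
    pv_contains_scan _ _ (show "fast" ∈ pvKeywords by decide),
    pv_contains_scan _ _ (show "works well" ∈ pvKeywords by decide),
    pv_contains_scan _ _ (show "best" ∈ pvKeywords by decide),
    pv_contains_scan _ _ (show "ideal" ∈ pvKeywords by decide),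
    pv_or_collapse_left "reef" "reef break" _ (by decide),
    pv_or_collapse_left "beach" "beach break" _ (by decide),
    pv_or_collapse_left "point" "point break" _ (by decide),
    pv_or_collapse_right "rock" "rocks" _ (by decide),
    Bool.or_false, Bool.or_assoc]
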